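-- pv_equiv track=rewrite | github.com/jorod2/paralela | 2practica/2practica_cliente.py | primera_palabra
-- ===== SOURCE A (Python) =====
-- def primera_palabra(msg:str):
--     resultado = ""
--
--     for i in range(len(msg)):
--
--         if msg[i] == ' ':
--             return resultado
--
--         else:
--             resultado += msg[i]
--
--     return resultado
-- ===== SOURCE B (Python) =====
-- def primera_palabra(msg: str):
--     idx = msg.find(' ')
--     return msg if idx == -1 else msg[:idx]
-- ===== Notes on version B (the rewrite author's own statement) =====
-- stated objective: simpler
-- what changed: B locates the first space once with str.find and returns a single slice (the whole string when there is no space), instead of accumulating characters one by one in a loop with an early return.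
import Mathlib
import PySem

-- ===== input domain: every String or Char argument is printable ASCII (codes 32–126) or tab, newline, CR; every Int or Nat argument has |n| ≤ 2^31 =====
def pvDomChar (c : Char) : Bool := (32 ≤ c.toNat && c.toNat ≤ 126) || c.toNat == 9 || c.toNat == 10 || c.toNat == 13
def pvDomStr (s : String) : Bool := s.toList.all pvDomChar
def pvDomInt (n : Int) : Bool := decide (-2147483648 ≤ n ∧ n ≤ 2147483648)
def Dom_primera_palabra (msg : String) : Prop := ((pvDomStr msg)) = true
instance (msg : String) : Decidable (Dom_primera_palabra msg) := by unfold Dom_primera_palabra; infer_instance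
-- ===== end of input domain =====

-- B replaces A's character-by-character accumulation loop by one find(' ') plus a single slice (whole string when no space); objective: simpler.

-- ===== PORT A =====
-- the loop: walk the characters, growing 'resultado'; return it at the first space
def pvGoA (acc : List Char) : List Char → List Char
  | [] => acc
  | c :: cs => if c = ' ' then acc else pvGoA (acc ++ [c]) cs

def primera_palabra (msg : String) : String :=
  String.ofList (pvGoA [] msg.toList)

-- ===== PORT B =====
def primera_palabra_alt (msg : String) : String :=
  let idx := PySem.Str.find msg " "
  if idx = -1 then msg else PySem.Str.slice msg none (some idx)

-- ===== PRECONDITION & SPEC =====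
def Spec_primera_palabra (msg : String) (out : String) : Prop := out = primera_palabra_alt msg
instance (msg : String) (out : String) : Decidable (Spec_primera_palabra msg out) := by unfold Spec_primera_palabra; infer_instance

-- ===== CLAIM (what is proved, stated in full; the proofs are below) =====
def Claim_equal_primera_palabra : Prop := ∀ (msg : String), Dom_primera_palabra msg → Spec_primera_palabra msg (primera_palabra msg)

-- ===== LEMMAS AND PROOFS =====

theorem pvGoA_eq_takeWhile (s acc : List Char) :
    pvGoA acc s = acc ++ s.takeWhile (fun c => !(c == ' ')) := by
  induction s generalizing acc with
  | nil => simp [pvGoA]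
  | cons c cs ih =>
    by_cases h : c = ' '
    · simp [pvGoA, h]
    · simp [pvGoA, h, ih]

theorem pvTake_eq_takeWhile (s : List Char) (n : Nat)
    (h1 : ∀ i, i < n → ∀ (hi : i < s.length), s[i] ≠ ' ')
    (h2 : s[n]? = some ' ') :
    s.take n = s.takeWhile (fun c => !(c == ' ')) := by
  induction s generalizing n with
  | nil => simp at h2
  | cons c cs ih =>
    cases n with
    | zero =>
      simp at h2
      simp [h2]
    | succ m =>
      have hc : c ≠ ' ' := h1 0 (Nat.succ_pos m) (by simp)
      rw [List.take_succ_cons, List.takeWhile_cons_of_pos (by simp [hc])]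
      exact congrArg (c :: ·)
        (ih m (fun i hi hlt => h1 (i + 1) (by omega) (by simpa using Nat.succ_lt_succ hlt))
          (by simpa using h2))

theorem pvDrop_prefix_iff (s : List Char) (i : Nat) (hi : i < s.length) :
    [' '] <+: s.drop i ↔ s[i] = ' ' := by
  constructor
  · rintro ⟨t, ht⟩
    have h0 : (s.drop i)[0]? = some ' ' := by rw [← ht]; simp
    simpa [List.getElem?_drop, List.getElem?_eq_getElem hi] using h0
  · intro h
    exact ⟨s.drop (i + 1), by rw [List.drop_eq_getElem_cons hi]; simp [h]⟩

-- ===== VERDICT (by name: the statement is the Claim_ definition above) =====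
theorem primera_palabra_spec : Claim_equal_primera_palabra := by
  intro msg _
  show _ = _
  have hA : pvGoA [] msg.toList = msg.toList.takeWhile (fun c => !(c == ' ')) := by
    simpa using pvGoA_eq_takeWhile msg.toList []
  apply String.toList_inj.mp
  unfold primera_palabra primera_palabra_alt
  by_cases hfind : PySem.Str.find msg " " = -1
  · -- no space: takeWhile keeps everything
    have hnin : ¬ ([' '] <:+: msg.toList) := by
      have := (PySem.Str.find_eq_neg_one_iff (s := msg) (sub := " ")).mp hfind
      simpa using this
    have hall : ∀ c ∈ msg.toList, c ≠ ' ' := by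
      intro c hc he
      subst he
      obtain ⟨u, v, huv⟩ := List.append_of_mem hc
      exact hnin ⟨u, v, by simp [huv]⟩
    have hself : msg.toList.takeWhile (fun c => !(c == ' ')) = msg.toList :=
      List.takeWhile_eq_self_iff.mpr (by intro c hc; simpa using hall c hc)
    have hfind' : PySem.Chars.find msg.toList [' '] = -1 := by simpa using hfind
    simp [hA, hself, hfind']
  · -- a space occurs; find points at the first one
    have h0 : (0 : Int) ≤ PySem.Chars.find msg.toList [' '] := by
      have h1 := PySem.Chars.neg_one_le_find (s := msg.toList) (sub := [' '])
      have h2 : PySem.Chars.find msg.toList [' '] ≠ -1 := by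
        simpa [PySem.Str.find] using hfind
      omega
    set n : Nat := (PySem.Chars.find msg.toList [' ']).toNat with hn
    obtain ⟨hpre, hmin⟩ := PySem.Chars.find_spec (s := msg.toList) (sub := [' ']) h0
    have hlen : n < msg.toList.length := by
      rcases hpre with ⟨t, ht⟩
      have hne : msg.toList.drop n ≠ [] := by rw [← ht]; simp
      by_contra hge
      exact hne (List.drop_eq_nil_of_le (by omega))
    have hgetn : msg.toList[n]? = some ' ' := by
      have := (pvDrop_prefix_iff msg.toList n hlen).mp hpre
      simp [List.getElem?_eq_getElem hlen, this]
    have htake : msg.toList.take n = msg.toList.takeWhile (fun c => !(c == ' ')) := by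
      apply pvTake_eq_takeWhile _ _ _ hgetn
      intro i hi hlt hsp
      exact hmin i hi ((pvDrop_prefix_iff msg.toList i hlt).mpr hsp)
    simp only [if_neg hfind]
    simp [hA]
    rw [PySem.List.slice_to _ h0, ← hn]
    exact htake.symm
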